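-- pv_equiv track=rewrite | github.com/Askatect/libjrary | pyjap/formatting.py | wrapper
-- ===== SOURCE A (Python) =====
-- def wrapper(string: str, wrapleft: str, wrapright: str):
-- 	if (string[0], string[-1]) in (("'", "'"), ('[', ']')):
-- 		string = string[1:-1]
-- 	string = string.replace(wrapleft, '').replace(wrapright, '')
-- 	wrap = False
-- 	word = ''
-- 	for letter in string:
-- 		if letter.isalnum() or letter in ('_', '#'):
-- 			if not wrap:
-- 				letter = wrapleft + letter
-- 			wrap = True
-- 		else:
-- 			if wrap:
-- 				letter = wrapright + letter
-- 			wrap = False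
-- 		word = word + letter
-- 	if wrap:
-- 		word = word + wrapright
-- 	return word
-- ===== SOURCE B (Python) =====
-- def wrapper(string: str, wrapleft: str, wrapright: str):
-- 	if (string[0], string[-1]) in (("'", "'"), ('[', ']')):
-- 		string = string[1:-1]
-- 	s = string.replace(wrapleft, '').replace(wrapright, '')
--
-- 	def is_word(c):
-- 		return c.isalnum() or c in ('_', '#')
--
-- 	pieces = []
-- 	i, n = 0, len(s)
-- 	while i < n:
-- 		k = is_word(s[i])
-- 		j = i + 1
-- 		while j < n and is_word(s[j]) == k:
-- 			j += 1
-- 		seg = s[i:j]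
-- 		pieces.append(wrapleft + seg + wrapright if k else seg)
-- 		i = j
-- 	return ''.join(pieces)
-- ===== Notes on version B (the rewrite author's own statement) =====
-- stated objective: simpler
-- what changed: Replaces A's char-by-char flag machine (wrap state, per-letter prefixing, trailing-wrap fixup) with run detection: B scans maximal runs of word/non-word characters and appends each run as one segment, wrapped iff it is a word run, joining the pieces at the end.
-- outside the precondition, e.g. on wrapper('', '[', ']'): A raises IndexError, B raises IndexError
import Mathlib
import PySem

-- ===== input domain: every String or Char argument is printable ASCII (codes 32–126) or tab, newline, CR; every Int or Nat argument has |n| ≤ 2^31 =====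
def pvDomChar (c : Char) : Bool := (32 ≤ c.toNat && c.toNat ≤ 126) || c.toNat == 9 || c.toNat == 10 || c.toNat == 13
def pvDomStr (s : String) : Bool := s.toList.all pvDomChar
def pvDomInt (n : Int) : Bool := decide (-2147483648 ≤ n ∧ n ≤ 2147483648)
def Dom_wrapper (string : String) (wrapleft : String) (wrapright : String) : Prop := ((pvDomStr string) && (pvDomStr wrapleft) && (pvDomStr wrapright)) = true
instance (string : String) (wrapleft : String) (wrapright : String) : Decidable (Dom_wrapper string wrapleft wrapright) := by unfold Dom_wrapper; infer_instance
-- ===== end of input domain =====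

-- B replaces A's char-by-char wrap-flag machine by scanning maximal word/non-word runs and
-- wrapping each word run as one segment (objective: simpler); return values agree on Pre_.

-- letter.isalnum() or letter in ('_', '#')
def pIsWord (c : Char) : Bool := PySem.Chars.isalnum c || c == '_' || c == '#'

-- ===== PORT A =====
def wrapper (string : String) (wrapleft : String) (wrapright : String) : String :=
  let s0 := string.toList
  -- if (string[0], string[-1]) in (("'", "'"), ('[', ']')): string = string[1:-1]
  -- (string[0]/string[-1] raise IndexError on the empty string: excluded by Pre_)
  let s1 := match PySem.List.pyGet? s0 (0 : Int), PySem.List.pyGet? s0 (-1 : Int) with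
    | some a, some b =>
        if (a = '\'' ∧ b = '\'') ∨ (a = '[' ∧ b = ']') then
          PySem.List.slice s0 (some 1) (some (-1))
        else s0
    | _, _ => s0
  -- string = string.replace(wrapleft, '').replace(wrapright, '')
  let s2 := PySem.Chars.replace (PySem.Chars.replace s1 wrapleft.toList []) wrapright.toList []
  -- wrap = False; word = ''; for letter in string: …
  let r := s2.foldl (fun (st : Bool × List Char) (c : Char) =>
    if pIsWord c then
      (true, st.2 ++ (if st.1 then [c] else wrapleft.toList ++ [c]))
    else
      (false, st.2 ++ (if st.1 then wrapright.toList ++ [c] else [c]))) (false, [])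
  -- if wrap: word = word + wrapright
  String.ofList (if r.1 then r.2 ++ wrapright.toList else r.2)

-- ===== PORT B =====
-- def is_word(c): return c.isalnum() or c in ('_', '#')
def isWord (c : Char) : Bool := PySem.Chars.isalnum c || c == '_' || c == '#'

-- the run-scanning while loop of Source B: take the maximal run with the same is_word key,
-- emit it as one piece (wrapped if a word run), continue after the run
def bLoop (wl wr : String) : List Char → List (List Char)
  | [] => []
  | c :: rest =>
      let k := isWord c
      let seg := c :: rest.takeWhile (fun d => isWord d == k)
      (if k then wl.toList ++ seg ++ wr.toList else seg)
        :: bLoop wl wr (rest.dropWhile (fun d => isWord d == k))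
termination_by cs => cs.length
decreasing_by
  simp only [List.length_cons]
  exact Nat.lt_succ_of_le (List.length_dropWhile_le _ _)

def wrapper_alt (string : String) (wrapleft : String) (wrapright : String) : String :=
  let s0 := string.toList
  let s1 :=
    if (PySem.List.pyGet? s0 (0 : Int) = some '\'' ∧ PySem.List.pyGet? s0 (-1 : Int) = some '\'')
       ∨ (PySem.List.pyGet? s0 (0 : Int) = some '[' ∧ PySem.List.pyGet? s0 (-1 : Int) = some ']') then
      PySem.List.slice s0 (some 1) (some (-1))
    else s0
  let s2 := PySem.Chars.replace (PySem.Chars.replace s1 wrapleft.toList []) wrapright.toList []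
  -- ''.join(pieces)
  String.ofList (bLoop wrapleft wrapright s2).flatten

-- ===== PRECONDITION & SPEC =====
-- Pre_ excludes only the empty string, on which A raises IndexError at string[0].
def Pre_wrapper (string : String) (wrapleft : String) (wrapright : String) : Prop := string ≠ ""
instance (string : String) (wrapleft : String) (wrapright : String) : Decidable (Pre_wrapper string wrapleft wrapright) := by unfold Pre_wrapper; infer_instance
def pvWitness_wrapper : String × String × String := ("'ab c_d'", "[", "]")

def Spec_wrapper (string : String) (wrapleft : String) (wrapright : String) (out : String) : Prop := out = wrapper_alt string wrapleft wrapright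
instance (string : String) (wrapleft : String) (wrapright : String) (out : String) : Decidable (Spec_wrapper string wrapleft wrapright out) := by unfold Spec_wrapper; infer_instance

-- ===== CLAIM (what is proved, stated in full; the proofs are below) =====
def Claim_equal_wrapper : Prop := ∀ (string : String) (wrapleft : String) (wrapright : String), Dom_wrapper string wrapleft wrapright → Pre_wrapper string wrapleft wrapright → Spec_wrapper string wrapleft wrapright (wrapper string wrapleft wrapright)

-- ===== LEMMAS AND PROOFS =====

theorem isWord_eq_pIsWord : isWord = pIsWord := rfl

theorem prologue_eq (s0 : List Char) :
    (match PySem.List.pyGet? s0 (0 : Int), PySem.List.pyGet? s0 (-1 : Int) with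
      | some a, some b =>
          if (a = '\'' ∧ b = '\'') ∨ (a = '[' ∧ b = ']') then
            PySem.List.slice s0 (some 1) (some (-1))
          else s0
      | _, _ => s0)
    = (if (PySem.List.pyGet? s0 (0 : Int) = some '\'' ∧ PySem.List.pyGet? s0 (-1 : Int) = some '\'')
          ∨ (PySem.List.pyGet? s0 (0 : Int) = some '[' ∧ PySem.List.pyGet? s0 (-1 : Int) = some ']') then
        PySem.List.slice s0 (some 1) (some (-1))
      else s0) := by
  rcases PySem.List.pyGet? s0 (0 : Int) with _ | a <;>
    rcases PySem.List.pyGet? s0 (-1 : Int) with _ | b <;> simp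

-- A's loop, rephrased as a tail-producing recursion on the remaining characters
-- (includes the trailing `if wrap: word + wrapright`)
def aLoop (wl wr : List Char) : Bool → List Char → List Char
  | wrap, [] => if wrap then wr else []
  | wrap, c :: cs =>
      if pIsWord c then (if wrap then [c] else wl ++ [c]) ++ aLoop wl wr true cs
      else (if wrap then wr ++ [c] else [c]) ++ aLoop wl wr false cs

theorem foldl_eq_aLoop (wl wr : List Char) (cs : List Char) :
    ∀ (wrap : Bool) (word : List Char),
      (let r := cs.foldl (fun (st : Bool × List Char) (c : Char) =>
        if pIsWord c then
          (true, st.2 ++ (if st.1 then [c] else wl ++ [c]))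
        else
          (false, st.2 ++ (if st.1 then wr ++ [c] else [c]))) (wrap, word)
       if r.1 then r.2 ++ wr else r.2) = word ++ aLoop wl wr wrap cs := by
  induction cs with
  | nil => intro wrap word; cases wrap <;> simp [aLoop]
  | cons c cs ih =>
      intro wrap word
      by_cases h : pIsWord c = true <;> cases wrap <;>
        simp [aLoop, h, List.foldl_cons, ih]

theorem aLoop_true_run (wl wr : List Char) (cs : List Char) :
    aLoop wl wr true cs =
      cs.takeWhile (fun d => pIsWord d == true) ++ wr ++
        aLoop wl wr false (cs.dropWhile (fun d => pIsWord d == true)) := by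
  induction cs with
  | nil => simp [aLoop]
  | cons c cs ih =>
      by_cases h : pIsWord c = true
      · simp [aLoop, h, List.takeWhile_cons, List.dropWhile_cons, ih]
      · simp [aLoop, h, List.takeWhile_cons, List.dropWhile_cons]

theorem aLoop_false_run (wl wr : List Char) (cs : List Char) :
    aLoop wl wr false cs =
      cs.takeWhile (fun d => pIsWord d == false) ++
        aLoop wl wr false (cs.dropWhile (fun d => pIsWord d == false)) := by
  induction cs with
  | nil => simp [aLoop]
  | cons c cs ih =>
      by_cases h : pIsWord c = true
      · simp [List.takeWhile_cons, List.dropWhile_cons, h]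
      · simp [aLoop, h, List.takeWhile_cons, List.dropWhile_cons, ih]

theorem aLoop_eq_bLoop (wl wr : String) : ∀ (cs : List Char),
    aLoop wl.toList wr.toList false cs = (bLoop wl wr cs).flatten := by
  intro cs
  induction hn : cs.length using Nat.strong_induction_on generalizing cs with
  | _ n ih =>
    cases cs with
    | nil => simp [aLoop, bLoop]
    | cons c rest =>
        by_cases h : pIsWord c = true
        · have := ih (rest.dropWhile (fun d => pIsWord d == true)).length
            (by subst hn; simp only [List.length_cons];
                exact Nat.lt_succ_of_le (List.length_dropWhile_le _ _)) _ rfl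
          rw [bLoop]
          simp only [isWord_eq_pIsWord, h]
          simp [aLoop, h, aLoop_true_run]
          simpa using this
        · have := ih (rest.dropWhile (fun d => pIsWord d == false)).length
            (by subst hn; simp only [List.length_cons];
                exact Nat.lt_succ_of_le (List.length_dropWhile_le _ _)) _ rfl
          rw [bLoop]
          simp only [isWord_eq_pIsWord, h]
          simp only [aLoop, h, if_neg, Bool.false_eq_true, not_false_eq_true, if_false]
          rw [aLoop_false_run]
          simp [h, List.takeWhile_cons, List.dropWhile_cons]
          simpa using this

-- ===== VERDICT (by name: the statement is the Claim_ definition above) =====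
theorem wrapper_spec : Claim_equal_wrapper := by
  intro string wrapleft wrapright _ _
  unfold Spec_wrapper wrapper wrapper_alt
  simp only []
  rw [prologue_eq, foldl_eq_aLoop, aLoop_eq_bLoop]
  simp
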